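-- pv_equiv track=rewrite | github.com/impresso/impresso-pycommons | impresso_commons/images/utils.py | get_png
-- ===== SOURCE A (Python) =====
-- from collections import defaultdict
--
-- def get_png(pngs, page_digit):
--     # png files have the form of '/Img/Pg006_180.png' or '/Img/Pg006.png'
--     if not pngs:
--         return None
--     else:
--         # group by pages (there can be several images per pages)
--         d = defaultdict(list)
--         for i in pngs:
--             elems = i.split("/", 1)
--             d[elems[0]].append(elems[1])
--
--         # take the image paths from the page we're interested in
--         png_paths = d[page_digit]
--
--         # there are several png
--         if len(png_paths) > 1:
--             # get pages with different resolutions (i.e. having "_": 'Img/Pg006_180.png')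
--             pngs_with_res = [x for x in png_paths if "_" in x]
--             # return the highest resolution
--             return pngs_with_res[-1]
--         # there is only one png
--         elif len(png_paths) == 1:
--             return png_paths[0]
--         else:
--             return None
-- ===== SOURCE B (Python) =====
-- def get_png(pngs, page_digit):
--     # one pass, scalar state: no dict of lists, no per-page lists
--     count = 0
--     first = None
--     best = None
--     for i in pngs:
--         elems = i.split("/", 1)
--         tail = elems[1]
--         if elems[0] == page_digit:
--             count += 1
--             if first is None:
--                 first = tail
--             if "_" in tail:
--                 best = tail
--     return best if count > 1 else first
-- ===== Notes on version B (the rewrite author's own statement) =====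
-- stated objective: simpler
-- what changed: B replaces A's defaultdict-of-lists grouping plus post-hoc list filtering by a single pass that keeps only three scalars (match count, first matching suffix, last matching suffix containing '_'), returning best/first directly.
import Mathlib
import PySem

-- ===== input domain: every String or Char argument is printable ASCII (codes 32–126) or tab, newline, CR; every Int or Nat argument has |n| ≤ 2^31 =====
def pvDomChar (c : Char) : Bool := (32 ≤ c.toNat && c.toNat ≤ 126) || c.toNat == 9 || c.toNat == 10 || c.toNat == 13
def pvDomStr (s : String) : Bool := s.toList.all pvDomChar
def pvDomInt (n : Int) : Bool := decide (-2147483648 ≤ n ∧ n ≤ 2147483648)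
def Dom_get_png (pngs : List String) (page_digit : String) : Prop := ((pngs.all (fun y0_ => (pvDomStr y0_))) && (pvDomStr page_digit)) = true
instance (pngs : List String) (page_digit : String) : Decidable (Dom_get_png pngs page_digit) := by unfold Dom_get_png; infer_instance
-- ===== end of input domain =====

-- B replaces A's defaultdict grouping + post-hoc filtering by a single pass over three scalars (simpler); return-value equivalence only.

-- ===== PORT A =====
-- the grouping loop: d[elems[0]].append(elems[1]); none = IndexError (elems[1] missing)
def get_png_aLoop (l : List String) (d : PySem.Dict String (List String)) :
    Option (PySem.Dict String (List String)) :=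
  match l with
  | [] => some d
  | i :: rest =>
    match PySem.Str.splitMax? i "/" 1 with
    | none => none
    | some elems =>
      match PySem.List.pyGet? elems 0, PySem.List.pyGet? elems 1 with
      | some h, some t => get_png_aLoop rest (d.modify h [] (· ++ [t]))
      | _, _ => none

def get_png (pngs : List String) (page_digit : String) : Option String :=
  if pngs = [] then none
  else
    match get_png_aLoop pngs PySem.Dict.empty with
    | none => none          -- IndexError inside the loop (excluded by Pre_)
    | some d =>
      let png_paths := d.getD page_digit []
      if 1 < png_paths.length then
        let pngs_with_res := png_paths.filter (fun x => PySem.Str.isIn "_" x)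
        PySem.List.pyGet? pngs_with_res (-1)   -- none = IndexError (excluded by Pre_)
      else if png_paths.length = 1 then
        PySem.List.pyGet? png_paths 0
      else none

-- ===== PORT B =====
-- single pass keeping (count, first matching suffix, last matching suffix containing '_')
def get_png_altLoop (page_digit : String) (l : List String)
    (count : Nat) (first best : Option String) :
    Option (Nat × Option String × Option String) :=
  match l with
  | [] => some (count, first, best)
  | i :: rest =>
    match PySem.Str.splitMax? i "/" 1 with
    | none => none
    | some elems =>
      match PySem.List.pyGet? elems 1 with
      | none => none        -- IndexError: png without '/'
      | some tail =>
        if PySem.List.pyGetD elems 0 "" == page_digit then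
          get_png_altLoop page_digit rest (count + 1)
            (if first = none then some tail else first)
            (if PySem.Str.isIn "_" tail then some tail else best)
        else
          get_png_altLoop page_digit rest count first best

def get_png_alt (pngs : List String) (page_digit : String) : Option String :=
  match get_png_altLoop page_digit pngs 0 none none with
  | none => none
  | some (count, first, best) => if 1 < count then best else first

-- ===== PRECONDITION & SPEC =====
def pvSplit1 (i : String) : List String := (PySem.Str.splitMax? i "/" 1).getD []

-- Pre_ excludes exactly the inputs where Python A raises IndexError: some png without '/',
-- or more than one png matching page_digit while no matching suffix contains '_'.
def Pre_get_png (pngs : List String) (page_digit : String) : Prop :=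
  (∀ i ∈ pngs, 2 ≤ (pvSplit1 i).length) ∧
  (1 < pngs.countP (fun i => (pvSplit1 i).getD 0 "" == page_digit) →
    ∃ i ∈ pngs, (pvSplit1 i).getD 0 "" = page_digit ∧
      PySem.Str.isIn "_" ((pvSplit1 i).getD 1 "") = true)
instance (pngs : List String) (page_digit : String) : Decidable (Pre_get_png pngs page_digit) := by
  unfold Pre_get_png; infer_instance

def pvWitness_get_png : List String × String := (["Pg006/Pg006_180.png", "Pg006/Pg006.png"], "Pg006")

def Spec_get_png (pngs : List String) (page_digit : String) (out : Option String) : Prop := out = get_png_alt pngs page_digit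
instance (pngs : List String) (page_digit : String) (out : Option String) : Decidable (Spec_get_png pngs page_digit out) := by unfold Spec_get_png; infer_instance

-- ===== CLAIM (what is proved, stated in full; the proofs are below) =====
def Claim_equal_get_png : Prop := ∀ (pngs : List String) (page_digit : String), Dom_get_png pngs page_digit → Pre_get_png pngs page_digit → Spec_get_png pngs page_digit (get_png pngs page_digit)
-- ===== LEMMAS AND PROOFS =====
-- the suffixes of the pngs whose prefix is pd, in order
def pvTails (pd : String) (l : List String) : List String :=
  l.filterMap (fun i =>
    match PySem.Str.splitMax? i "/" 1 with
    | some (h :: t :: _) => if h == pd then some t else none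
    | _ => none)

theorem pvGetLast?_cons {α : Type} (x : α) (xs : List α) :
    (x :: xs).getLast? = xs.getLast?.or (some x) := by
  rw [List.getLast?_cons]
  cases xs.getLast? <;> rfl

theorem pvLoops (pd : String) : ∀ (l : List String) (d : PySem.Dict String (List String))
    (c : Nat) (f b : Option String),
    (get_png_aLoop l d = none ∧ get_png_altLoop pd l c f b = none) ∨
    (∃ d', get_png_aLoop l d = some d' ∧
      get_png_altLoop pd l c f b =
        some (c + (pvTails pd l).length, f.or (pvTails pd l).head?,
              ((pvTails pd l).filter (fun x => PySem.Str.isIn "_" x)).getLast?.or b) ∧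
      d'.getD pd [] = d.getD pd [] ++ pvTails pd l) := by
  intro l
  induction l with
  | nil => intro d c f b; right; exact ⟨d, rfl, by simp [get_png_altLoop, pvTails], by simp [pvTails]⟩
  | cons i rest ih =>
    intro d c f b
    cases hs : PySem.Str.splitMax? i "/" 1 with
    | none => left; constructor <;> simp [get_png_aLoop, get_png_altLoop, hs]
    | some elems =>
      match elems with
      | [] => left; constructor <;>
          simp [get_png_aLoop, get_png_altLoop, hs, PySem.List.pyGet?, PySem.List.pyIdx?]
      | [h] => left; constructor <;>
          simp [get_png_aLoop, get_png_altLoop, hs, PySem.List.pyGet?, PySem.List.pyIdx?]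
      | h :: t :: r =>
        have h0 : PySem.List.pyGet? (h :: t :: r) (0 : Int) = some h :=
          PySem.List.pyGet?_zero_cons h (t :: r)
        have h1 : PySem.List.pyGet? (h :: t :: r) (1 : Int) = some t := by
          simp [PySem.List.pyGet?, PySem.List.pyIdx?]
        have hd0 : PySem.List.pyGetD (h :: t :: r) (0 : Int) "" = h := by
          simp [PySem.List.pyGetD, h0]
        have hA : get_png_aLoop (i :: rest) d =
            get_png_aLoop rest (d.modify h [] (· ++ [t])) := by
          simp [get_png_aLoop, hs, h0]
        by_cases hm : h = pd
        · have hB : get_png_altLoop pd (i :: rest) c f b =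
              get_png_altLoop pd rest (c + 1) (if f = none then some t else f)
                (if PySem.Str.isIn "_" t then some t else b) := by
            simp [get_png_altLoop, hs, hm]
          have htl : pvTails pd (i :: rest) = t :: pvTails pd rest := by
            simp only [pvTails, List.filterMap_cons, hs, hm]
            simp
          rcases ih (d.modify h [] (· ++ [t])) (c + 1) (if f = none then some t else f)
              (if PySem.Str.isIn "_" t then some t else b) with ⟨ha, hb⟩ | ⟨d', ha, hb, hg⟩
          · left; rw [hA, hB]; exact ⟨ha, hb⟩
          · right
            refine ⟨d', by rw [hA]; exact ha, ?_, ?_⟩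
            · rw [hB, hb, htl]
              simp only [Option.some.injEq, Prod.mk.injEq]
              refine ⟨by simp; omega, ?_, ?_⟩
              · cases f <;> simp [Option.or]
              · by_cases hu : PySem.Str.isIn "_" t = true
                · rw [if_pos hu, List.filter_cons, if_pos hu, pvGetLast?_cons,
                    Option.or_assoc, Option.some_or]
                · rw [if_neg hu, List.filter_cons, if_neg hu]
            · rw [hg, htl]
              simp [hm]
        · have hB : get_png_altLoop pd (i :: rest) c f b =
              get_png_altLoop pd rest c f b := by
            simp [get_png_altLoop, hs, hd0, hm]
          have htl : pvTails pd (i :: rest) = pvTails pd rest := by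
            simp only [pvTails, List.filterMap_cons, hs]
            simp [hm]
          rcases ih (d.modify h [] (· ++ [t])) c f b with ⟨ha, hb⟩ | ⟨d', ha, hb, hg⟩
          · left; rw [hA, hB]; exact ⟨ha, hb⟩
          · right
            refine ⟨d', by rw [hA]; exact ha, ?_, ?_⟩
            · rw [hB, hb, htl]
            · rw [hg, htl]
              simp [PySem.Dict.getD_modify, Ne.symm hm]

theorem pv_eq (pngs : List String) (pd : String) : get_png pngs pd = get_png_alt pngs pd := by
  by_cases hnil : pngs = []
  · subst hnil; rfl
  · unfold get_png get_png_alt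
    rcases pvLoops pd pngs PySem.Dict.empty 0 none none with ⟨ha, hb⟩ | ⟨d', ha, hb, hg⟩
    · simp [hnil, ha, hb]
    · have hg' : d'.getD pd [] = pvTails pd pngs := by simpa using hg
      simp only [hnil, if_false, ha, hb, hg', Option.or_none, Option.none_or, Nat.zero_add]
      generalize pvTails pd pngs = ms
      match ms with
      | [] => simp
      | [x] => simp
      | x :: y :: l => simp [PySem.List.pyGet?_neg_one, List.length_cons]

-- ===== VERDICT (by name: the statement is the Claim_ definition above) =====
theorem get_png_spec : Claim_equal_get_png := by
  intro pngs pd _ _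
  unfold Spec_get_png
  exact pv_eq pngs pd
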